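-- pv_equiv track=rewrite | github.com/cmahncke/cmahncke | utilities.py | del_redundant
-- ===== SOURCE A (Python) =====
-- def del_redundant(data_dict, redundant_ids):
--     popped = {}
--
--     for key in list(data_dict):
--         if key in redundant_ids:
--             sequence = data_dict[key][-1]
--             popped[key] = sequence
--             data_dict.pop(key)
--     return popped
-- ===== SOURCE B (Python) =====
-- def del_redundant(data_dict, redundant_ids):
--     keys = list(data_dict)
--     found = {}
--     for rid in redundant_ids:
--         if rid in data_dict:
--             found[rid] = data_dict.pop(rid)
--     return {k: found[k][-1] for k in keys if k in found}
-- ===== Notes on version B (the rewrite author's own statement) =====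
-- stated objective: faster
-- what changed: A loops over a snapshot of the dict keys and probes the redundant_ids LIST per key (O(m) scan inside the loop); B swaps the roles of the two collections: it loops over redundant_ids popping each present key's full value into a scratch dict (O(1) probes of the dict), then one final pass over the pre-saved key snapshot rebuilds popped in the dict's original order taking each value's last element.
import Mathlib
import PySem

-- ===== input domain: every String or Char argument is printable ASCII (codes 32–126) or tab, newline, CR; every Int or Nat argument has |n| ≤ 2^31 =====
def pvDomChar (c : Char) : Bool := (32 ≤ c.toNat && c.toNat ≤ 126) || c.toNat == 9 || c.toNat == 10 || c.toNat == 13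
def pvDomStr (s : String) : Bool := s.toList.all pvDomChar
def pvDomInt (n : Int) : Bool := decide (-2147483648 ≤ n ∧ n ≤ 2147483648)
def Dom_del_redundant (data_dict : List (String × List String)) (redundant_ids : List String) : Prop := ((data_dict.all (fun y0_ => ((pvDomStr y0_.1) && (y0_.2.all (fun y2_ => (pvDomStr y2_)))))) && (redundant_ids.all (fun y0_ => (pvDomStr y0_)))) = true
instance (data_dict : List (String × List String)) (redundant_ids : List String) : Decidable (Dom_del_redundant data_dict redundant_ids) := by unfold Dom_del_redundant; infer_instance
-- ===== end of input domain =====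

-- B swaps the iterated and the probed collection: instead of A's loop over the dict keys that
-- scans the redundant_ids LIST per key, B loops over redundant_ids popping each present key's
-- value into a scratch dict, then rebuilds popped in the dict's original key order in one final
-- pass over a pre-saved key snapshot. Both A and B remove the same keys from the caller's dict;
-- the equivalence proved here is about the RETURN value.

-- ===== PORT A =====
def del_redundant (data_dict : List (String × List String)) (redundant_ids : List String) : List (String × String) :=
  -- popped = {}; for key in list(data_dict): if key in redundant_ids:
  --   sequence = data_dict[key][-1]; popped[key] = sequence; data_dict.pop(key)
  let d0 : PySem.Dict String (List String) := PySem.Dict.ofList data_dict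
  let res := d0.keys.foldl
    (fun (st : PySem.Dict String String × PySem.Dict String (List String)) key =>
      if redundant_ids.contains key then
        let sequence := PySem.List.pyGetD (st.2.getD key []) (-1) ""   -- data_dict[key][-1]; under Pre_
        (st.1.insert key sequence, st.2.erase key)
      else st)
    (PySem.Dict.empty, d0)
  res.1.items

-- ===== PORT B =====
def del_redundant_alt (data_dict : List (String × List String)) (redundant_ids : List String) : List (String × String) :=
  -- keys = list(data_dict); found = {}
  -- for rid in redundant_ids:
  --   if rid in data_dict: found[rid] = data_dict.pop(rid)
  -- return {k: found[k][-1] for k in keys if k in found}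
  let d0 : PySem.Dict String (List String) := PySem.Dict.ofList data_dict
  let keys := d0.keys
  let st := redundant_ids.foldl
    (fun (st : PySem.Dict String (List String) × PySem.Dict String (List String)) rid =>
      if st.2.contains rid then (st.1.insert rid (st.2.getD rid []), st.2.erase rid) else st)
    (PySem.Dict.empty, d0)
  ((keys.filter (fun k => st.1.contains k)).foldl
    (fun (p : PySem.Dict String String) k =>
      p.insert k (PySem.List.pyGetD (st.1.getD k []) (-1) ""))   -- found[k][-1]; under Pre_
    PySem.Dict.empty).items

-- ===== PRECONDITION & SPEC =====
-- Pre_ excludes exactly the inputs where the dict maps some redundant id to an EMPTY list: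
-- there Python's data_dict[key][-1] raises IndexError in A (and found[k][-1] raises in B too).
def Pre_del_redundant (data_dict : List (String × List String)) (redundant_ids : List String) : Prop :=
  ∀ kv ∈ (PySem.Dict.ofList data_dict).items, kv.1 ∈ redundant_ids → kv.2 ≠ []
instance (data_dict : List (String × List String)) (redundant_ids : List String) : Decidable (Pre_del_redundant data_dict redundant_ids) := by unfold Pre_del_redundant; infer_instance

def pvWitness_del_redundant : (List (String × List String)) × List String :=
  ([("a", ["x", "y"]), ("b", ["z"]), ("c", ["w"])], ["b", "a", "q"])

def Spec_del_redundant (data_dict : List (String × List String)) (redundant_ids : List String) (out : List (String × String)) : Prop := out = del_redundant_alt data_dict redundant_ids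
instance (data_dict : List (String × List String)) (redundant_ids : List String) (out : List (String × String)) : Decidable (Spec_del_redundant data_dict redundant_ids out) := by unfold Spec_del_redundant; infer_instance

-- ===== CLAIM (what is proved, stated in full; the proofs are below) =====
def Claim_equal_del_redundant : Prop := ∀ (data_dict : List (String × List String)) (redundant_ids : List String), Dom_del_redundant data_dict redundant_ids → Pre_del_redundant data_dict redundant_ids → Spec_del_redundant data_dict redundant_ids (del_redundant data_dict redundant_ids)

-- ===== LEMMAS AND PROOFS =====

-- (no erase lemma in the prelude) erasing key k does not change lookups at k' ≠ k
theorem pv_get?_erase_of_ne {κ ν : Type} [BEq κ] [LawfulBEq κ]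
    (d : PySem.Dict κ ν) (k k' : κ) (h : k' ≠ k) : (d.erase k).get? k' = d.get? k' := by
  obtain ⟨l⟩ := d
  simp only [PySem.Dict.erase, PySem.Dict.get?]
  have hfun : (fun a : κ × ν => decide ((!a.1 == k) = true ∧ (a.1 == k') = true))
      = (fun a : κ × ν => a.1 == k') := by
    funext a
    by_cases ha : a.1 = k'
    · simp [ha, h]
    · simp [ha]
  rw [List.find?_filter, hfun]

-- (no erase lemma in the prelude) a lookup at the erased key itself is none
theorem pv_get?_erase_self {κ ν : Type} [BEq κ] [LawfulBEq κ]
    (d : PySem.Dict κ ν) (k : κ) : (d.erase k).get? k = none := by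
  obtain ⟨l⟩ := d
  simp only [PySem.Dict.erase, PySem.Dict.get?]
  rw [List.find?_filter, List.find?_eq_none.2 (fun a _ => by simp)]
  rfl

-- contains = false read back as a failed lookup
theorem pv_get?_eq_none_of_contains_false {κ ν : Type} [BEq κ] [LawfulBEq κ]
    (d : PySem.Dict κ ν) (k : κ) (h : d.contains k = false) : d.get? k = none := by
  have hce := PySem.Dict.contains_eq_isSome_get? (d := d) (k := k)
  rw [h] at hce
  cases hg : d.get? k with
  | none => rfl
  | some v => rw [hg] at hce; simp at hce

-- contains = true read back as a successful lookup
theorem pv_get?_eq_some_of_contains_true {κ ν : Type} [BEq κ] [LawfulBEq κ]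
    (d : PySem.Dict κ ν) (k : κ) (h : d.contains k = true) : ∃ v, d.get? k = some v := by
  have hce := PySem.Dict.contains_eq_isSome_get? (d := d) (k := k)
  rw [h] at hce
  cases hg : d.get? k with
  | none => rw [hg] at hce; simp at hce
  | some v => exact ⟨v, rfl⟩

-- what A's loop over the items of a dict with distinct keys produces
theorem pv_loopA_items (redundant_ids : List String) :
    ∀ (L : List (String × List String)) (p : PySem.Dict String String)
      (d : PySem.Dict String (List String)),
      (∀ kv ∈ L, d.get? kv.1 = some kv.2) →
      (L.map (·.1)).Nodup →
      (∀ kv ∈ L, p.contains kv.1 = false) →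
      (L.foldl
        (fun (st : PySem.Dict String String × PySem.Dict String (List String)) kv =>
          if redundant_ids.contains kv.1 then
            (st.1.insert kv.1 (PySem.List.pyGetD (st.2.getD kv.1 []) (-1) ""), st.2.erase kv.1)
          else st)
        (p, d)).1.items
      = p.items ++ (L.filter (fun kv => redundant_ids.contains kv.1)).map
          (fun kv => (kv.1, PySem.List.pyGetD kv.2 (-1) "")) := by
  intro L
  induction L with
  | nil => intro p d _ _ _; simp
  | cons kv L ih =>
    intro p d hget hnd hp
    simp only [List.map_cons, List.nodup_cons] at hnd
    obtain ⟨hnotin, hndL⟩ := hnd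
    have hhead : d.get? kv.1 = some kv.2 := hget kv List.mem_cons_self
    have hgetD : d.getD kv.1 [] = kv.2 := PySem.Dict.getD_of_get?_eq_some d [] hhead
    have hne : ∀ kv' ∈ L, kv'.1 ≠ kv.1 := by
      intro kv' h' he
      apply hnotin
      rw [← he]
      exact List.mem_map_of_mem h'
    simp only [List.foldl_cons, List.filter_cons]
    by_cases hr : redundant_ids.contains kv.1
    · simp only [hr, if_pos, hgetD]
      rw [ih (p.insert kv.1 (PySem.List.pyGetD kv.2 (-1) "")) (d.erase kv.1)
        (fun kv' h' => by
          rw [pv_get?_erase_of_ne d kv.1 kv'.1 (hne kv' h')]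
          exact hget kv' (List.mem_cons_of_mem _ h'))
        hndL
        (fun kv' h' => by
          rw [PySem.Dict.contains_insert]
          simp [hne kv' h', hp kv' (List.mem_cons_of_mem _ h')])]
      rw [PySem.Dict.items_insert_of_not_contains p _ (hp kv List.mem_cons_self)]
      simp
    · simp only [hr, Bool.false_eq_true, if_neg, not_false_iff]
      exact ih p d (fun kv' h' => hget kv' (List.mem_cons_of_mem _ h'))
        hndL (fun kv' h' => hp kv' (List.mem_cons_of_mem _ h'))

-- what B's pop loop over redundant_ids leaves in 'found', as a per-key lookup fact
theorem pv_loopB_get? :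
    ∀ (R : List String) (f d : PySem.Dict String (List String)),
      (∀ k, f.contains k = true → d.get? k = none) →
      ∀ k, ((R.foldl
        (fun (st : PySem.Dict String (List String) × PySem.Dict String (List String)) rid =>
          if st.2.contains rid then (st.1.insert rid (st.2.getD rid []), st.2.erase rid) else st)
        (f, d)).1).get? k
        = if k ∈ R then (f.get? k).or (d.get? k) else f.get? k := by
  intro R
  induction R with
  | nil => intro f d _ k; simp
  | cons rid R ih =>
    intro f d hdisj k
    simp only [List.foldl_cons]
    by_cases hc : d.contains rid
    · simp only [hc, if_pos]
      obtain ⟨v, hv⟩ := pv_get?_eq_some_of_contains_true d rid hc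
      have hfnone : f.get? rid = none := by
        by_cases hf : f.contains rid
        · rw [hdisj rid hf] at hv; exact absurd hv (by simp)
        · exact pv_get?_eq_none_of_contains_false f rid (by simpa using hf)
      rw [ih (f.insert rid (d.getD rid [])) (d.erase rid)
        (fun k' hk' => by
          rw [PySem.Dict.contains_insert] at hk'
          by_cases hke : k' = rid
          · rw [hke]; exact pv_get?_erase_self d rid
          · rw [pv_get?_erase_of_ne d rid k' hke]
            exact hdisj k' (by simpa [hke] using hk'))]
      have hgD : d.getD rid [] = v := PySem.Dict.getD_of_get?_eq_some d [] hv
      by_cases hke : k = rid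
      · subst hke
        rw [PySem.Dict.get?_insert_self, pv_get?_erase_self, hgD, hfnone, hv]
        by_cases hmem : k ∈ R <;> simp [hmem]
      · rw [PySem.Dict.get?_insert_of_ne f _ hke, pv_get?_erase_of_ne d rid k hke]
        simp [List.mem_cons, hke]
    · simp only [hc, Bool.false_eq_true, if_neg, not_false_iff]
      rw [ih f d hdisj]
      have hdnone : d.get? rid = none :=
        pv_get?_eq_none_of_contains_false d rid (by simpa using hc)
      by_cases hke : k = rid
      · subst hke
        by_cases hmem : k ∈ R <;> simp [hmem, hdnone]
      · simp [List.mem_cons, hke]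

-- ===== VERDICT (by name: the statement is the Claim_ definition above) =====
theorem del_redundant_spec : Claim_equal_del_redundant := by
  intro data_dict redundant_ids _ _
  unfold Spec_del_redundant
  simp only [del_redundant, del_redundant_alt]
  set d0 := PySem.Dict.ofList data_dict with hd0
  have hnd : (d0.items.map (·.1)).Nodup := PySem.Dict.nodup_keys_ofList data_dict
  -- the snapshot list(data_dict) is the item keys, on both sides
  rw [show d0.keys = d0.items.map (fun x => x.1) from rfl, List.foldl_map]
  rw [pv_loopA_items redundant_ids d0.items PySem.Dict.empty d0
      (fun kv h => PySem.Dict.get?_of_mem_items d0 h hnd)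
      hnd
      (fun kv _ => PySem.Dict.contains_empty kv.1)]
  -- characterize B's 'found'
  have hfound : ∀ k, ((redundant_ids.foldl
      (fun (st : PySem.Dict String (List String) × PySem.Dict String (List String)) rid =>
        if st.2.contains rid then (st.1.insert rid (st.2.getD rid []), st.2.erase rid) else st)
      (PySem.Dict.empty, d0)).1).get? k
      = if k ∈ redundant_ids then d0.get? k else none := by
    intro k
    rw [pv_loopB_get? redundant_ids PySem.Dict.empty d0
      (fun k' hk' => by rw [PySem.Dict.contains_empty] at hk'; exact absurd hk' (by simp))]
    simp
  set found := (redundant_ids.foldl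
      (fun (st : PySem.Dict String (List String) × PySem.Dict String (List String)) rid =>
        if st.2.contains rid then (st.1.insert rid (st.2.getD rid []), st.2.erase rid) else st)
      (PySem.Dict.empty, d0)).1 with hfdef
  -- on the key snapshot, membership in 'found' is membership in redundant_ids
  have hfilter : (d0.items.map (fun x => x.1)).filter (fun k => found.contains k)
      = (d0.items.map (fun x => x.1)).filter (fun k => redundant_ids.contains k) := by
    apply List.filter_congr
    intro k hk
    have hksome : d0.get? k ≠ none := fun hnone =>
      (PySem.Dict.get?_eq_none_iff_not_mem_keys (d := d0) (k := k)).1 hnone hk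
    rw [PySem.Dict.contains_eq_isSome_get?, hfound k]
    by_cases hmem : k ∈ redundant_ids
    · simp [hmem, Option.isSome_iff_ne_none, hksome]
    · simp [hmem]
  rw [hfilter]
  -- evaluate B's rebuild loop (fresh distinct keys append)
  have hsubkeys : ((d0.items.map (fun x => x.1)).filter
      (fun k => redundant_ids.contains k)).Sublist (d0.items.map (fun x => x.1)) :=
    List.filter_sublist
  rw [PySem.Dict.items_foldl_insert_fresh
      ((d0.items.map (fun x => x.1)).filter (fun k => redundant_ids.contains k))
      (fun k => k) (fun k => PySem.List.pyGetD (found.getD k []) (-1) "") PySem.Dict.empty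
      (fun k _ => PySem.Dict.contains_empty k)
      (by simpa using hnd.sublist hsubkeys)]
  -- both sides are the same filter-map over d0.items
  rw [List.filter_map, List.map_map]
  rw [show (PySem.Dict.empty : PySem.Dict String String).items = [] from rfl, List.nil_append]
  apply List.map_congr_left
  intro kv hkv
  have hkvmem : kv ∈ d0.items := List.mem_of_mem_filter hkv
  have hpred : redundant_ids.contains kv.1 := by
    have := List.of_mem_filter hkv
    simpa using this
  have hget : d0.get? kv.1 = some kv.2 := PySem.Dict.get?_of_mem_items d0 hkvmem hnd
  have : found.getD kv.1 [] = kv.2 := by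
    rw [PySem.Dict.getD_eq_get?_getD, hfound kv.1,
      if_pos ((List.contains_iff_mem).1 hpred), hget]
    rfl
  simp [Function.comp, this]
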